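-- pv_equiv track=rewrite | github.com/dhawal-mehta/DSA | sorting 1/Number of sextuplets.py | solve
-- ===== SOURCE A (Python) =====
-- def solve( A):
--     sett = {}
--     for i in A:
--         for j in A:
--             for k in A:
--                 if k != 0:
--                     temp = (i + j)*k
--                     if temp not in sett:
--                         sett[temp] = 1
--                     else:
--                         sett[temp] += 1
--
--     ans = 0
--     for i in A:
--         for j in A:
--             for k in A:
--                 temp = i*j + k
--                 if temp in sett:
--                     ans = ( ans + sett[temp])%(10**9 + 7)
--
--     return ans
-- ===== SOURCE B (Python) =====
-- def solve(A):
--     MOD = 10**9 + 7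
--     # pair-level frequency maps: sums[s] = #{(i,j): i+j == s}, prods[p] = #{(i,j): i*j == p}
--     sums = {}
--     prods = {}
--     for i in A:
--         for j in A:
--             s = i + j
--             sums[s] = sums.get(s, 0) + 1
--             p = i * j
--             prods[p] = prods.get(p, 0) + 1
--     # c1[v] = number of triples (i,j,k), k != 0, with (i+j)*k == v
--     c1 = {}
--     for s, cs in sums.items():
--         for k in A:
--             if k != 0:
--                 v = s * k
--                 c1[v] = c1.get(v, 0) + cs
--     # dot product: for each product p (with multiplicity) and each k, add c1[p + k]
--     total = 0
--     for p, cp in prods.items():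
--         for k in A:
--             total += cp * c1.get(p + k, 0)
--     return total % MOD
-- ===== Notes on version B (the rewrite author's own statement) =====
-- stated objective: faster
-- what changed: Instead of two triple-nested enumerations over A (build a counter of (i+j)*k, then per-triple lookup of i*j+k), B first builds pair-level frequency maps of all sums i+j and products i*j in one O(n^2) pass, then builds the (i+j)*k counter from distinct sums weighted by multiplicity, and computes the answer as a weighted dot product over distinct products, so repeated values are processed once.
import Mathlib
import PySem

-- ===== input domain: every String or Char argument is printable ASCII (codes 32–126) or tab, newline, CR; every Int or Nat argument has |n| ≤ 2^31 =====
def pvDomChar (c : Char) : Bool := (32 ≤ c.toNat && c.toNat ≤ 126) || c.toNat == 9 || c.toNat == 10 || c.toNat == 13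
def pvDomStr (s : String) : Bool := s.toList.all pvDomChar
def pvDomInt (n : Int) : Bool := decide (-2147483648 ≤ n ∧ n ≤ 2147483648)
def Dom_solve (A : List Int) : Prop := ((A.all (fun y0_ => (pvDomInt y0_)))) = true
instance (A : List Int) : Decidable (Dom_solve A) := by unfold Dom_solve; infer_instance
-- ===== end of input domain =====

-- B replaces A's two triple-nested passes by pair-level frequency maps (sums/products counted once)
-- plus weighted combine passes over distinct keys; a timing run reports it measurably faster.

-- ===== PORT A =====
def solve (A : List Int) : Int :=
  let sett : PySem.Dict Int Int :=
    A.foldl (fun sett i =>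
      A.foldl (fun sett j =>
        A.foldl (fun sett k =>
          if k ≠ 0 then
            let temp := (i + j) * k
            if sett.contains temp = false then sett.insert temp 1
            else sett.modify temp 0 (· + 1)
          else sett) sett) sett) PySem.Dict.empty
  let ans : Int :=
    A.foldl (fun ans i =>
      A.foldl (fun ans j =>
        A.foldl (fun ans k =>
          let temp := i * j + k
          if sett.contains temp then (ans + sett.getD temp 0) % ((10:Int) ^ 9 + 7)
          else ans) ans) ans) 0
  ans

-- ===== PORT B =====
def solve_alt (A : List Int) : Int :=
  let M : Int := (10:Int) ^ 9 + 7
  let sp :=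
    A.foldl (fun sp i =>
      A.foldl (fun sp j =>
        (sp.1.insert (i + j) (sp.1.getD (i + j) 0 + 1),
         sp.2.insert (i * j) (sp.2.getD (i * j) 0 + 1))) sp)
      ((PySem.Dict.empty : PySem.Dict Int Int), (PySem.Dict.empty : PySem.Dict Int Int))
  let sums := sp.1
  let prods := sp.2
  let c1 : PySem.Dict Int Int :=
    sums.items.foldl (fun c1 r =>
      A.foldl (fun c1 k =>
        if k ≠ 0 then c1.insert (r.1 * k) (c1.getD (r.1 * k) 0 + r.2) else c1) c1)
      PySem.Dict.empty
  let total : Int :=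
    prods.items.foldl (fun total r =>
      A.foldl (fun total k => total + r.2 * c1.getD (r.1 + k) 0) total) 0
  total % M

-- ===== PRECONDITION & SPEC =====
def Spec_solve (A : List Int) (out : Int) : Prop := out = solve_alt A
instance (A : List Int) (out : Int) : Decidable (Spec_solve A out) := by unfold Spec_solve; infer_instance

-- ===== CLAIM (what is proved, stated in full; the proofs are below) =====
def Claim_equal_solve : Prop := ∀ (A : List Int), Dom_solve A → Spec_solve A (solve A)

-- ===== LEMMAS AND PROOFS =====

-- proof-side lists: triples, pairs, pair sums, pair products, nonzero elements, the (i+j)*k multiset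
def pvT (A : List Int) : List (Int × Int × Int) :=
  A.flatMap (fun i => A.flatMap (fun j => A.map (fun k => (i, j, k))))
def pvPr (A : List Int) : List (Int × Int) := A.flatMap (fun i => A.map (fun j => (i, j)))
def pvS (A : List Int) : List Int := (pvPr A).map (fun q => q.1 + q.2)
def pvP (A : List Int) : List Int := (pvPr A).map (fun q => q.1 * q.2)
def pvAnz (A : List Int) : List Int := A.filter (fun k => decide (k ≠ 0))
def pvL1 (A : List Int) : List Int := (pvS A).flatMap (fun s => (pvAnz A).map (fun k => s * k))
def pvW (A : List Int) : List (Int × Int) :=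
  (PySem.Dict.counter (pvS A)).items.flatMap (fun r => (pvAnz A).map (fun k => (r.1 * k, r.2)))

lemma pv_nest3 {δ : Type} (A : List Int) (f : Int → Int → Int → δ → δ) (init : δ) :
    A.foldl (fun d i => A.foldl (fun d j => A.foldl (fun d k => f i j k d) d) d) init
      = (pvT A).foldl (fun d t => f t.1 t.2.1 t.2.2 d) init := by
  simp [pvT, List.foldl_flatMap, List.foldl_map]

lemma pv_nest2 {α β δ : Type} (l1 : List α) (l2 : List β) (f : α → β → δ → δ) (init : δ) :
    l1.foldl (fun d x => l2.foldl (fun d y => f x y d) d) init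
      = (l1.flatMap (fun x => l2.map (fun y => (x, y)))).foldl (fun d q => f q.1 q.2 d) init := by
  simp [List.foldl_flatMap, List.foldl_map]

lemma pv_sum_flatMap {α : Type} (l : List α) (f : α → List Int) :
    (l.flatMap f).sum = (l.map (fun x => (f x).sum)).sum := by
  rw [List.flatMap_def, List.sum_flatten, List.map_map]
  simp [Function.comp_def]

lemma pv_prod_nest2 {β σ₁ σ₂ : Type} (l1 l2 : List β)
    (f : σ₁ → β → β → σ₁) (g : σ₂ → β → β → σ₂) :
    ∀ (a : σ₁) (b : σ₂),
    l1.foldl (fun sp i => l2.foldl (fun sp j => (f sp.1 i j, g sp.2 i j)) sp) (a, b)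
      = (l1.foldl (fun d i => l2.foldl (fun d j => f d i j) d) a,
         l1.foldl (fun d i => l2.foldl (fun d j => g d i j) d) b) := by
  induction l1 with
  | nil => intro a b; rfl
  | cons x t ih =>
      intro a b
      simp only [List.foldl_cons]
      rw [PySem.List.foldl_prod_mk (f := fun s e => f s x e) (g := fun s e => g s x e)]
      exact ih _ _

lemma pv_cstep (d : PySem.Dict Int Int) (x : Int) :
    (if d.contains x = false then d.insert x 1 else d.modify x 0 (· + 1))
      = d.insert x (d.getD x 0 + 1) := by
  by_cases h : d.contains x
  · simp [h, PySem.Dict.modify]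
  · have h' : d.contains x = false := by simpa using h
    simp [h', PySem.Dict.getD_of_not_contains d 0 h']

lemma pv_L1_eq (A : List Int) :
    (((pvT A).filter (fun t => decide (t.2.2 ≠ 0))).map (fun t => (t.1 + t.2.1) * t.2.2))
      = pvL1 A := by
  simp only [pvT, pvL1, pvS, pvPr, pvAnz, List.filter_flatMap, List.filter_map,
             List.map_flatMap, List.flatMap_map, List.flatMap_assoc, List.map_map,
             Function.comp_def]

lemma pv_sett_eq (A : List Int) :
    (A.foldl (fun sett i => A.foldl (fun sett j => A.foldl (fun sett k =>
        if k ≠ 0 then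
          (if sett.contains ((i + j) * k) = false then sett.insert ((i + j) * k) 1
           else sett.modify ((i + j) * k) 0 (· + 1))
        else sett) sett) sett) PySem.Dict.empty)
      = PySem.Dict.counter (pvL1 A) := by
  rw [pv_nest3 A (fun i j k (d : PySem.Dict Int Int) =>
        if k ≠ 0 then
          (if d.contains ((i + j) * k) = false then d.insert ((i + j) * k) 1
           else d.modify ((i + j) * k) 0 (· + 1))
        else d) PySem.Dict.empty]
  rw [PySem.List.foldl_ite_eq_foldl_filter (fun t : Int × Int × Int => t.2.2 ≠ 0)
        (fun (d : PySem.Dict Int Int) t => if d.contains ((t.1 + t.2.1) * t.2.2) = false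
                    then d.insert ((t.1 + t.2.1) * t.2.2) 1
                    else d.modify ((t.1 + t.2.1) * t.2.2) 0 (· + 1))
        (pvT A) PySem.Dict.empty]
  rw [PySem.List.foldl_congr_mem' _ _
        (fun (d : PySem.Dict Int Int) t => d.insert ((t.1 + t.2.1) * t.2.2) (d.getD ((t.1 + t.2.1) * t.2.2) 0 + 1))
        _ (by intro t _ d; exact pv_cstep d _)]
  rw [← List.foldl_map (f := fun t : Int × Int × Int => (t.1 + t.2.1) * t.2.2)
        (g := fun (d : PySem.Dict Int Int) (x : Int) => d.insert x (d.getD x 0 + 1))]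
  rw [PySem.Dict.foldl_insert_getD_add_one_eq_counter, pv_L1_eq]

lemma pv_modsum (xs : List Int) (L : List Int) : ∀ (a : Int),
    L.foldl (fun ans x =>
        if (PySem.Dict.counter xs).contains x then
          (ans + (PySem.Dict.counter xs).getD x 0) % ((10:Int) ^ 9 + 7)
        else ans) (a % ((10:Int) ^ 9 + 7))
      = (a + (L.map (fun x => (xs.count x : Int))).sum) % ((10:Int) ^ 9 + 7) := by
  induction L with
  | nil => intro a; simp
  | cons x t ih =>
      intro a
      simp only [PySem.Dict.contains_counter, PySem.Dict.getD_counter] at ih ⊢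
      simp only [List.foldl_cons]
      by_cases hx : xs.contains x = true
      · rw [if_pos hx, Int.emod_add_emod, ih (a + xs.count x)]
        congr 1
        simp only [List.map_cons, List.sum_cons]
        ring
      · rw [if_neg hx, ih a]
        have hx' : xs.contains x = false := by simpa using hx
        have hmem : x ∉ xs := by simpa [List.contains_eq_mem] using hx'
        simp [List.count_eq_zero_of_not_mem hmem]

lemma pv_modsum0 (xs : List Int) (L : List Int) :
    L.foldl (fun ans x =>
        if (PySem.Dict.counter xs).contains x then
          (ans + (PySem.Dict.counter xs).getD x 0) % ((10:Int) ^ 9 + 7)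
        else ans) 0
      = (L.map (fun x => (xs.count x : Int))).sum % ((10:Int) ^ 9 + 7) := by
  have h := pv_modsum xs L 0
  rw [Int.zero_emod] at h
  rw [zero_add] at h
  exact h

lemma pv_solve_eq (A : List Int) :
    solve A = (((pvT A).map (fun t => t.1 * t.2.1 + t.2.2)).map
        (fun x => ((pvL1 A).count x : Int))).sum % ((10:Int) ^ 9 + 7) := by
  simp only [solve]
  simp only [pv_sett_eq]
  rw [pv_nest3 A (fun i j k (ans : Int) =>
        if (PySem.Dict.counter (pvL1 A)).contains (i * j + k) then
          (ans + (PySem.Dict.counter (pvL1 A)).getD (i * j + k) 0) % ((10:Int) ^ 9 + 7)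
        else ans) 0]
  rw [← List.foldl_map (f := fun t : Int × Int × Int => t.1 * t.2.1 + t.2.2)
        (g := fun (ans : Int) (x : Int) =>
          if (PySem.Dict.counter (pvL1 A)).contains x then
            (ans + (PySem.Dict.counter (pvL1 A)).getD x 0) % ((10:Int) ^ 9 + 7)
          else ans)]
  exact pv_modsum0 (pvL1 A) ((pvT A).map (fun t => t.1 * t.2.1 + t.2.2))

lemma pv_sums_eq (A : List Int) :
    A.foldl (fun sp i => A.foldl (fun sp j =>
        (sp.1.insert (i + j) (sp.1.getD (i + j) 0 + 1),
         sp.2.insert (i * j) (sp.2.getD (i * j) 0 + 1))) sp)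
      ((PySem.Dict.empty : PySem.Dict Int Int), (PySem.Dict.empty : PySem.Dict Int Int))
      = (PySem.Dict.counter (pvS A), PySem.Dict.counter (pvP A)) := by
  rw [pv_prod_nest2 A A
        (fun (d : PySem.Dict Int Int) i j => d.insert (i + j) (d.getD (i + j) 0 + 1))
        (fun (d : PySem.Dict Int Int) i j => d.insert (i * j) (d.getD (i * j) 0 + 1))
        PySem.Dict.empty PySem.Dict.empty]
  have hs : A.foldl (fun (d : PySem.Dict Int Int) i =>
        A.foldl (fun d j => d.insert (i + j) (d.getD (i + j) 0 + 1)) d) PySem.Dict.empty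
      = PySem.Dict.counter (pvS A) := by
    rw [pv_nest2 A A (fun (x y : Int) (d : PySem.Dict Int Int) =>
          d.insert (x + y) (d.getD (x + y) 0 + 1)) PySem.Dict.empty]
    rw [← List.foldl_map (f := fun q : Int × Int => q.1 + q.2)
          (g := fun (d : PySem.Dict Int Int) (x : Int) => d.insert x (d.getD x 0 + 1))]
    rw [PySem.Dict.foldl_insert_getD_add_one_eq_counter]
    rfl
  have hp : A.foldl (fun (d : PySem.Dict Int Int) i =>
        A.foldl (fun d j => d.insert (i * j) (d.getD (i * j) 0 + 1)) d) PySem.Dict.empty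
      = PySem.Dict.counter (pvP A) := by
    rw [pv_nest2 A A (fun (x y : Int) (d : PySem.Dict Int Int) =>
          d.insert (x * y) (d.getD (x * y) 0 + 1)) PySem.Dict.empty]
    rw [← List.foldl_map (f := fun q : Int × Int => q.1 * q.2)
          (g := fun (d : PySem.Dict Int Int) (x : Int) => d.insert x (d.getD x 0 + 1))]
    rw [PySem.Dict.foldl_insert_getD_add_one_eq_counter]
    rfl
  rw [hs, hp]

lemma pv_wget (l : List (Int × Int)) : ∀ (d : PySem.Dict Int Int) (v : Int),
    (l.foldl (fun d q => d.insert q.1 (d.getD q.1 0 + q.2)) d).getD v 0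
      = d.getD v 0 + ((l.filter (fun q => q.1 == v)).map (fun q => q.2)).sum := by
  induction l with
  | nil => intro d v; simp
  | cons q t ih =>
      intro d v
      simp only [List.foldl_cons, List.filter_cons]
      by_cases h : q.1 = v
      · rw [ih]
        rw [PySem.Dict.getD_insert]
        simp only [h, beq_self_eq_true, if_true, List.map_cons, List.sum_cons]
        ring
      · have h' : ¬ (v = q.1) := fun hh => h hh.symm
        rw [ih, PySem.Dict.getD_insert]
        simp [h, h']

lemma pv_c1_getD (A : List Int) (v : Int) :
    ((PySem.Dict.counter (pvS A)).items.foldl (fun c1 r => A.foldl (fun c1 k =>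
        if k ≠ 0 then c1.insert (r.1 * k) (c1.getD (r.1 * k) 0 + r.2) else c1) c1)
      PySem.Dict.empty).getD v 0
      = (((pvW A).filter (fun q => q.1 == v)).map (fun q => q.2)).sum := by
  have h1 : ∀ (r : Int × Int) (d : PySem.Dict Int Int),
      A.foldl (fun c1 k =>
          if k ≠ 0 then c1.insert (r.1 * k) (c1.getD (r.1 * k) 0 + r.2) else c1) d
        = ((pvAnz A).map (fun k => (r.1 * k, r.2))).foldl
            (fun c1 q => c1.insert q.1 (c1.getD q.1 0 + q.2)) d := by
    intro r d
    rw [PySem.List.foldl_ite_eq_foldl_filter (fun k : Int => k ≠ 0)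
          (fun (c1 : PySem.Dict Int Int) k =>
            c1.insert (r.1 * k) (c1.getD (r.1 * k) 0 + r.2)) A d]
    rw [List.foldl_map]
    rfl
  rw [PySem.List.foldl_congr_mem' _ _
        (fun (d : PySem.Dict Int Int) (r : Int × Int) =>
          ((pvAnz A).map (fun k => (r.1 * k, r.2))).foldl
            (fun c1 q => c1.insert q.1 (c1.getD q.1 0 + q.2)) d)
        _ (by intro r _ d; exact h1 r d)]
  rw [← List.foldl_flatMap
        (f := fun r : Int × Int => (pvAnz A).map (fun k => (r.1 * k, r.2)))
        (g := fun (c1 : PySem.Dict Int Int) (q : Int × Int) =>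
          c1.insert q.1 (c1.getD q.1 0 + q.2))]
  rw [pv_wget]
  simp [pvW, PySem.Dict.getD_empty]

lemma pv_w1 (A : List Int) (v : Int) :
    (((pvW A).filter (fun q => q.1 == v)).map (fun q => q.2)).sum
      = ((pvL1 A).count v : Int) := by
  have hW : pvW A = (PySem.Set.ofList (pvS A)).flatMap
      (fun s => (pvAnz A).map (fun k => (s * k, (List.count s (pvS A) : Int)))) := by
    rw [pvW, PySem.Dict.items_counter, List.flatMap_map]
  rw [hW, List.filter_flatMap, List.map_flatMap, pv_sum_flatMap]
  have hinner : ∀ s : Int,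
      ((((pvAnz A).map (fun k => (s * k, (List.count s (pvS A) : Int)))).filter
          (fun q => q.1 == v)).map (fun q => q.2)).sum
        = ((pvAnz A).countP (fun k => s * k == v) : Int) * (List.count s (pvS A) : Int) := by
    intro s
    rw [List.filter_map, List.map_map]
    simp only [Function.comp_def]
    rw [PySem.List.sum_map_const_int, ← List.countP_eq_length_filter]
  simp only [hinner]
  have hR : (pvL1 A).count v
      = ((pvS A).map (fun s => (pvAnz A).countP (fun k => s * k == v))).sum := by
    rw [pvL1, List.count_flatMap]
    simp [Function.comp_def, List.count_eq_countP, List.countP_map]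
  rw [hR, Nat.cast_list_sum, List.map_map]
  rw [← List.sum_toFinset _ (PySem.Set.nodup_ofList (pvS A))]
  rw [Finset.sum_list_map_count]
  have hfs : (PySem.Set.ofList (pvS A)).toFinset = (pvS A).toFinset := by
    ext x; simp [PySem.Set.mem_ofList]
  rw [hfs]
  refine Finset.sum_congr rfl ?_
  intro s _
  simp only [Function.comp_def]
  rw [nsmul_eq_mul]
  ring

lemma pv_main (A : List Int) :
    (((pvT A).map (fun t => t.1 * t.2.1 + t.2.2)).map
        (fun x => ((pvL1 A).count x : Int))).sum
      = ((PySem.Dict.counter (pvP A)).items.flatMap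
          (fun r => A.map (fun k => r.2 * ((pvL1 A).count (r.1 + k) : Int)))).sum := by
  have hT : pvT A = (pvPr A).flatMap (fun q => A.map (fun k => (q.1, q.2, k))) := by
    simp [pvT, pvPr, List.flatMap_assoc, List.flatMap_map]
  have hRHS : ((PySem.Dict.counter (pvP A)).items.flatMap
        (fun r => A.map (fun k => r.2 * ((pvL1 A).count (r.1 + k) : Int)))).sum
      = ∑ p ∈ (pvP A).toFinset, (List.count p (pvP A))
          • (A.map (fun k => ((pvL1 A).count (p + k) : Int))).sum := by
    rw [PySem.Dict.items_counter, List.flatMap_map, pv_sum_flatMap]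
    simp only [List.sum_map_mul_left]
    rw [← List.sum_toFinset _ (PySem.Set.nodup_ofList (pvP A))]
    have hfs : (PySem.Set.ofList (pvP A)).toFinset = (pvP A).toFinset := by
      ext x; simp [PySem.Set.mem_ofList]
    rw [hfs]
    refine Finset.sum_congr rfl ?_
    intro p _
    rw [nsmul_eq_mul]
  rw [hRHS]
  rw [List.map_map, hT, List.map_flatMap, pv_sum_flatMap]
  simp only [List.map_map, Function.comp_def]
  have hL : (pvPr A).map (fun q => (A.map (fun k => ((pvL1 A).count (q.1 * q.2 + k) : Int))).sum)
      = (pvP A).map (fun p => (A.map (fun k => ((pvL1 A).count (p + k) : Int))).sum) := by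
    rw [pvP, List.map_map]
    rfl
  rw [hL, Finset.sum_list_map_count]

lemma pv_alt_eq (A : List Int) :
    solve_alt A = ((PySem.Dict.counter (pvP A)).items.flatMap
        (fun r => A.map (fun k => r.2 * ((pvL1 A).count (r.1 + k) : Int)))).sum
        % ((10:Int) ^ 9 + 7) := by
  simp only [solve_alt]
  simp only [pv_sums_eq]
  simp only [pv_c1_getD, pv_w1]
  rw [PySem.List.foldl_congr_mem' _ _
        (fun (total : Int) (r : Int × Int) =>
          total + (A.map (fun k => r.2 * ((pvL1 A).count (r.1 + k) : Int))).sum)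
        _ (by intro r _ t; exact PySem.List.foldl_add A _ t)]
  rw [PySem.List.foldl_add ((PySem.Dict.counter (pvP A)).items)
        (fun r : Int × Int => (A.map (fun k => r.2 * ((pvL1 A).count (r.1 + k) : Int))).sum) 0]
  rw [pv_sum_flatMap]
  simp

-- ===== VERDICT (by name: the statement is the Claim_ definition above) =====
theorem solve_spec : Claim_equal_solve := by
  intro A _
  unfold Spec_solve
  rw [pv_solve_eq, pv_alt_eq, pv_main]
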